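-- pv_equiv track=rewrite | github.com/JaewanHwang/algorithm-study | pro_가사 검색/황재완.py | solution
-- ===== SOURCE A (Python) =====
-- from collections import defaultdict
--
-- class Node:
--     def __init__(self):
--         self.children = dict()
--         self.len_counter = defaultdict(int)
--
-- def make_trie(trie1, trie2, words):
--     for word in words:
--         cur1, cur2 = trie1, trie2
--         for i in range(len(word)):
--             j = len(word) - i
--             cur1.len_counter[j] += 1
--             cur2.len_counter[j] += 1
--             char1, char2 = word[i], word[j - 1]
--             if char1 not in cur1.children:
--                 cur1.children[char1] = Node()
--             if char2 not in cur2.children: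
--                 cur2.children[char2] = Node()
--             cur1 = cur1.children[char1]
--             cur2 = cur2.children[char2]
--
-- def solution(words, queries):
--     # trie1: 정방향 트라이, trie2: 역방향 트라이
--     trie1, trie2 = Node(), Node()
--     make_trie(trie1, trie2, words)
--     ans = [0] * len(queries)
--     for i, query in enumerate(queries):
--         if query[0] == '?' and query[-1] == '?':
--             ans[i] = trie1.len_counter[len(query)]
--         else:
--             cur, j = trie1 if query[-1] == '?' else trie2, 0
--             if query[0] == '?':
--                 query = query[::-1]
--             while query[j] in cur.children and query[j] != '?':
--                 cur = cur.children[query[j]]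
--                 j += 1
--             ans[i] = cur.len_counter[len(query) - j] if query[j] == '?' else 0
--     return ans
-- ===== SOURCE B (Python) =====
-- def solution(words, queries):
--     # Flat prefix-count dictionaries instead of tries:
--     # len_count[L]        = number of words of length L
--     # pref[(L, p)]        = number of words of length L having proper prefix p
--     # rpref[(L, p)]       = number of words of length L whose reversal has proper prefix p
--     len_count = {}
--     pref = {}
--     rpref = {}
--     for w in words:
--         L = len(w)
--         len_count[L] = len_count.get(L, 0) + 1
--         rw = w[::-1]
--         for i in range(L):
--             k = (L, w[:i])
--             pref[k] = pref.get(k, 0) + 1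
--             rk = (L, rw[:i])
--             rpref[rk] = rpref.get(rk, 0) + 1
--     ans = []
--     for q in queries:
--         L = len(q)
--         if q[0] == '?' and q[-1] == '?':
--             ans.append(len_count.get(L, 0))
--         elif q[-1] == '?':
--             p = q.split('?', 1)[0]          # fixed prefix before the first '?'
--             ans.append(pref.get((L, p), 0))
--         else:
--             rq = q[::-1]
--             p = rq.split('?', 1)[0]         # reversed fixed suffix after the last '?'
--             ans.append(rpref.get((L, p), 0))
--     return ans
-- ===== Notes on version B (the rewrite author's own statement) =====
-- stated objective: simpler
-- what changed: Replaces the two mutable linked tries (forward and reversed) and per-query trie walks with three flat dictionaries counting word lengths, (length, prefix) pairs and (length, reversed-prefix) pairs, so each query becomes a single hash lookup.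
-- outside the precondition, e.g. on solution(['baa'], ['a?b']): A returns [1], B returns [0]
import Mathlib
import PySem

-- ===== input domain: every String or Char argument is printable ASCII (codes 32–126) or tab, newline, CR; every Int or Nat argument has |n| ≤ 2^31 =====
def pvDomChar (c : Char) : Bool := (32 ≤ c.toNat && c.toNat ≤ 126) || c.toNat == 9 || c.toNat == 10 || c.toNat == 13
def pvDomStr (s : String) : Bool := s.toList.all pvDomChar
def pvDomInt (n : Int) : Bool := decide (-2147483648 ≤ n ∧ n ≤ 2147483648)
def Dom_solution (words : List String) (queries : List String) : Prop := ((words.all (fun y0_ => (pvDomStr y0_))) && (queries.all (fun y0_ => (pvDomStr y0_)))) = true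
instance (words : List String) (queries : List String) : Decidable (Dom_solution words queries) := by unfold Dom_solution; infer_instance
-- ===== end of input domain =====

-- B replaces the two tries with flat (length, prefix)-count dictionaries: same answers, simpler structure.
-- Python A mutates trie nodes in place; the port rebuilds nodes functionally (return values are unaffected).

-- ===== PORT A =====
-- children dicts of the trie are a mutual child-list type (a recursive PySem.Dict is not expressible);
-- insertion order of children never influences any lookup.
mutual
inductive PTrie : Type
  | node : PCL → PySem.Dict Int Int → PTrie
inductive PCL : Type
  | nil : PCL
  | cons : Char → PTrie → PCL → PCL
end

-- dict lookup 'children.get(c)' (first match; keys are unique by construction)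
def clGet? : PCL → Char → Option PTrie
  | .nil, _ => none
  | .cons a t rest, c => if c = a then some t else clGet? rest c

-- dict store 'children[c] = t' (overwrite keeps position, new key appends)
def clSet : PCL → Char → PTrie → PCL
  | .nil, c, t => .cons c t .nil
  | .cons a t0 rest, c, t => if c = a then .cons a t rest else .cons a t0 (clSet rest c t)

def PTrie.empty : PTrie := .node .nil PySem.Dict.empty

-- the inner loop of make_trie for one word (one cursor): bump len_counter[j], create/descend child
def insWord : PTrie → List Char → PTrie
  | t, [] => t
  | .node ch cnt, c :: rest =>
      -- cur.len_counter[j] += 1 with j = len(word) - i = rest.length + 1 (defaultdict(int))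
      let cnt' := cnt.modify ((rest.length : Int) + 1) 0 (· + 1)
      -- 'if char not in children: children[char] = Node()' then descend and mutate
      let child := (clGet? ch c).getD PTrie.empty
      PTrie.node (clSet ch c (insWord child rest)) cnt'

-- the while loop + final lookup of A's else-branch
def walkAns : PTrie → List Char → Int
  | _, [] => 0      -- Python raises IndexError here (query exhausted with no '?'); outside Pre_solution
  | .node ch cnt, c :: rest =>
      if c = '?' then cnt.getD ((rest.length : Int) + 1) 0   -- cur.len_counter[len(query) - j]
      else match clGet? ch c with
        | some t => walkAns t rest
        | none => 0

def rootCount : PTrie → Int → Int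
  | .node _ cnt, L => cnt.getD L 0

def solution (words : List String) (queries : List String) : List Int :=
  let t1 := words.foldl (fun t w => insWord t w.toList) PTrie.empty
  let t2 := words.foldl (fun t w => insWord t w.toList.reverse) PTrie.empty
  queries.map (fun q =>
    let cs := q.toList
    -- q[0] / q[-1]; on the empty query Python raises IndexError (outside Pre_solution)
    if cs.head? = some '?' ∧ cs.getLast? = some '?' then
      rootCount t1 (cs.length : Int)
    else
      let cur := if cs.getLast? = some '?' then t1 else t2
      let cs' := if cs.head? = some '?' then cs.reverse else cs
      walkAns cur cs')

-- ===== PORT B =====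
-- d[k] = d.get(k, 0) + 1
def bumpP (d : PySem.Dict (Int × List Char) Int) (k : Int × List Char) : PySem.Dict (Int × List Char) Int :=
  d.insert k (d.getD k 0 + 1)

-- one word: bump len_count[L] and, for i in range(L), pref[(L, w[:i])] and rpref[(L, rw[:i])]
def addWord (st : PySem.Dict Int Int × PySem.Dict (Int × List Char) Int × PySem.Dict (Int × List Char) Int)
    (w : List Char) :
    PySem.Dict Int Int × PySem.Dict (Int × List Char) Int × PySem.Dict (Int × List Char) Int :=
  let L : Int := w.length
  let lc := st.1.insert L (st.1.getD L 0 + 1)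
  let rw := w.reverse
  let pr := (PySem.List.pyRange 0 L 1).foldl
      (fun pr i => (bumpP pr.1 (L, PySem.List.slice w none (some i)),
                    bumpP pr.2 (L, PySem.List.slice rw none (some i))))
      (st.2.1, st.2.2)
  (lc, pr.1, pr.2)

def solution_alt (words : List String) (queries : List String) : List Int :=
  let st := words.foldl (fun st w => addWord st w.toList)
      (PySem.Dict.empty, PySem.Dict.empty, PySem.Dict.empty)
  queries.map (fun q =>
    let cs := q.toList
    let L : Int := cs.length
    if cs.head? = some '?' ∧ cs.getLast? = some '?' then
      st.1.getD L 0
    else if cs.getLast? = some '?' then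
      -- q.split('?', 1)[0] = the maximal '?'-free prefix (exact on every input)
      st.2.1.getD (L, cs.takeWhile (fun c => c != '?')) 0
    else
      -- rq = q[::-1]; rq.split('?', 1)[0]
      st.2.2.getD (L, cs.reverse.takeWhile (fun c => c != '?')) 0)

-- ===== PRECONDITION & SPEC =====
-- Pre_ excludes: empty queries and '?'-free queries that fully trace the reversed trie (A raises
-- IndexError there), and queries whose only '?' is interior — an unsupported pattern on which A's
-- reverse-trie walk yields an accidental value (it matches the query's PREFIX against word SUFFIXES)
-- while B matches the query's suffix; both are artefacts, neither is the specified behaviour.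
def Pre_solution (words : List String) (queries : List String) : Prop :=
  ∀ q ∈ queries, q.toList ≠ [] ∧
    (q.toList.head? = some '?' ∨ q.toList.getLast? = some '?' ∨
      ('?' ∉ q.toList ∧ ∀ w ∈ words, ¬(q.toList <+: w.toList.reverse)))
instance (words : List String) (queries : List String) : Decidable (Pre_solution words queries) := by
  unfold Pre_solution; infer_instance

def pvWitness_solution : List String × List String :=
  (["frodo", "front", "frost", "frane", "kakao"], ["fro??", "????o", "fr???", "?????"])

def Spec_solution (words : List String) (queries : List String) (out : List Int) : Prop := out = solution_alt words queries
instance (words : List String) (queries : List String) (out : List Int) : Decidable (Spec_solution words queries out) := by unfold Spec_solution; infer_instance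

-- ===== CLAIM (what is proved, stated in full; the proofs are below) =====
def Claim_equal_solution : Prop := ∀ (words : List String) (queries : List String), Dom_solution words queries → Pre_solution words queries → Spec_solution words queries (solution words queries)

-- ===== LEMMAS AND PROOFS =====

-- the common counting spec both programs compute: words of length L with prefix p
def wcnt (ws : List (List Char)) (L : Nat) (p : List Char) : Int :=
  ((ws.filter (fun w => decide (w.length = L ∧ p <+: w))).length : Int)

theorem clGet?_clSet_self (ch : PCL) (c : Char) (t : PTrie) : clGet? (clSet ch c t) c = some t :=
  match ch with
  | .nil => by simp [clSet, clGet?]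
  | .cons a t0 rest => by
      by_cases hac : c = a
      · simp [clSet, hac, clGet?]
      · simp [clSet, hac, clGet?, clGet?_clSet_self rest c t]

theorem clGet?_clSet_of_ne (ch : PCL) (c c' : Char) (t : PTrie) (h : c' ≠ c) :
    clGet? (clSet ch c t) c' = clGet? ch c' :=
  match ch with
  | .nil => by simp [clSet, clGet?, h]
  | .cons a t0 rest => by
      by_cases hac : c = a
      · subst hac; simp [clSet, clGet?, h]
      · by_cases hca : c' = a
        · simp [clSet, hac, clGet?, hca]
        · simp [clSet, hac, clGet?, hca, clGet?_clSet_of_ne rest c c' t h]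

theorem walk_empty (cs : List Char) : walkAns PTrie.empty cs = 0 := by
  cases cs with
  | nil => rfl
  | cons c rest =>
      by_cases hc : c = '?'
      · simp [PTrie.empty, walkAns, hc, PySem.Dict.getD_empty]
      · simp [PTrie.empty, walkAns, hc, clGet?]

theorem insWord_cons (ch : PCL) (cnt : PySem.Dict Int Int) (a : Char) (ws' : List Char) :
    insWord (.node ch cnt) (a :: ws')
      = .node (clSet ch a (insWord ((clGet? ch a).getD PTrie.empty) ws'))
              (cnt.modify ((ws'.length : Int) + 1) 0 (· + 1)) := rfl

theorem walk_q (ch : PCL) (d : PySem.Dict Int Int) (rest : List Char) :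
    walkAns (.node ch d) ('?' :: rest) = d.getD ((rest.length : Int) + 1) 0 := by
  simp [walkAns]

theorem walk_ne (ch : PCL) (d : PySem.Dict Int Int) (rest : List Char) (c : Char) (hc : c ≠ '?') :
    walkAns (.node ch d) (c :: rest)
      = (match clGet? ch c with | some t => walkAns t rest | none => 0) := by
  simp [walkAns, hc]

theorem walk_ins (cs : List Char) (h : '?' ∈ cs) (ws : List Char) (t : PTrie) :
    walkAns (insWord t ws) cs
      = walkAns t cs
        + (if ws.length = cs.length ∧ cs.takeWhile (fun c => c != '?') <+: ws then 1 else 0) := by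
  induction cs generalizing ws t with
  | nil => simp at h
  | cons c rest ih =>
      obtain ⟨ch, cnt⟩ := t
      cases ws with
      | nil => simp [insWord]
      | cons a ws' =>
          rw [insWord_cons]
          by_cases hc : c = '?'
          · subst hc
            rw [walk_q, walk_q, PySem.Dict.getD_modify]
            have htw : (('?' :: rest).takeWhile (fun c => c != '?')) = ([] : List Char) := by simp
            rw [htw]
            by_cases hlen : ws'.length = rest.length
            · simp [hlen]
            · rw [if_neg (by omega : ¬(((rest.length : Int)) + 1 = ((ws'.length : Int)) + 1)),
                if_neg (by simp; omega)]
              simp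
          · have h' : '?' ∈ rest := by
              rcases List.mem_cons.mp h with h0 | h0
              · exact absurd h0.symm hc
              · exact h0
            rw [walk_ne _ _ _ _ hc, walk_ne _ _ _ _ hc]
            by_cases hac : a = c
            · subst hac
              rw [clGet?_clSet_self]
              have htw : ((a :: rest).takeWhile (fun c => c != '?'))
                  = a :: rest.takeWhile (fun c => c != '?') := by simp [hc]
              rw [htw]
              cases hg : clGet? ch a with
              | some t' =>
                  simp only [Option.getD_some]
                  rw [ih h' ws' t']
                  congr 1
                  simp [List.cons_prefix_cons]
              | none =>
                  simp only [Option.getD_none]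
                  rw [ih h' ws' PTrie.empty, walk_empty]
                  congr 1
                  simp [List.cons_prefix_cons]
            · rw [clGet?_clSet_of_ne ch a c _ (fun hh => hac hh.symm)]
              have hnp : ¬ ((c :: rest).takeWhile (fun c => c != '?') <+: a :: ws') := by
                simp only [List.takeWhile_cons]
                rw [if_pos (by simp [hc])]
                rw [List.cons_prefix_cons]
                rintro ⟨hh, -⟩
                exact hac hh.symm
              rw [if_neg (fun hh => hnp hh.2)]
              simp

theorem walk_foldl (f : String → List Char) (words : List String) (t : PTrie)
    (cs : List Char) (h : '?' ∈ cs) :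
    walkAns (words.foldl (fun t w => insWord t (f w)) t) cs
      = walkAns t cs + wcnt (words.map f) cs.length (cs.takeWhile (fun c => c != '?')) := by
  induction words generalizing t with
  | nil => simp [wcnt]
  | cons w words ih =>
      rw [List.foldl_cons, ih, walk_ins cs h (f w) t]
      simp only [wcnt, List.map_cons, List.filter_cons]
      by_cases hw : (f w).length = cs.length ∧ cs.takeWhile (fun c => c != '?') <+: f w
      · simp [hw]
        ring
      · simp [hw]

theorem root_ins (t : PTrie) (ws : List Char) (L : Int) :
    rootCount (insWord t ws) L
      = rootCount t L + (if (ws.length : Int) = L ∧ ws ≠ [] then 1 else 0) := by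
  obtain ⟨ch, cnt⟩ := t
  cases ws with
  | nil => simp [insWord, rootCount]
  | cons a ws' =>
      rw [insWord_cons]
      simp only [rootCount]
      rw [PySem.Dict.getD_modify]
      by_cases hk : L = ((ws'.length : Int)) + 1
      · rw [if_pos hk, if_pos ⟨by push_cast [List.length_cons]; omega, List.cons_ne_nil a ws'⟩, hk]
      · rw [if_neg hk, if_neg (by rintro ⟨h1, -⟩; apply hk; push_cast [List.length_cons] at h1 ⊢; omega)]
        ring

theorem root_foldl (words : List String) (t : PTrie) (L : Int) :
    rootCount (words.foldl (fun t w => insWord t w.toList) t) L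
      = rootCount t L
        + ((words.filter (fun w => decide ((w.toList.length : Int) = L ∧ w.toList ≠ []))).length : Int) := by
  induction words generalizing t with
  | nil => simp
  | cons w words ih =>
      rw [List.foldl_cons, ih, root_ins t w.toList L, List.filter_cons]
      by_cases hw : ((w.toList.length : Int)) = L ∧ w.toList ≠ []
      · rw [if_pos (decide_eq_true hw), if_pos hw, List.length_cons]
        push_cast
        ring
      · rw [if_neg hw, decide_eq_false hw]
        simp

theorem count_take_range (w p : List Char) (n : Nat) (hn : n ≤ w.length) :
    ((List.range n).map (fun k => w.take k)).count p
      = if p <+: w ∧ p.length < n then 1 else 0 := by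
  induction n with
  | zero => simp
  | succ m ih =>
      rw [List.range_succ, List.map_append, List.count_append, ih (by omega)]
      rw [List.map_cons, List.map_nil]
      have hone : ([w.take m].count p) = if w.take m = p then 1 else 0 := by
        simp [List.count_singleton]
      rw [hone]
      have hlen : (w.take m).length = m := by simp; omega
      by_cases hp : p <+: w
      · have hteq : w.take p.length = p := (List.prefix_iff_eq_take.mp hp).symm
        by_cases hm : p.length = m
        · subst hm
          rw [if_pos hteq]
          simp [hp]
        · have hne : w.take m ≠ p := fun he => hm (by rw [← he, hlen])
          rw [if_neg hne]
          by_cases hlt : p.length < m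
          · rw [if_pos ⟨hp, hlt⟩, if_pos ⟨hp, by omega⟩]
          · rw [if_neg (fun hh => hlt hh.2), if_neg (fun hh => by omega)]
      · have hne : w.take m ≠ p := fun he => hp (he ▸ List.take_prefix m w)
        rw [if_neg hne]
        simp [hp]

theorem count_pair_const (c c' : Int) (p : List Char) (l : List (List Char)) :
    (l.map (fun x => (c, x))).count (c', p) = if c' = c then l.count p else 0 := by
  induction l with
  | nil => simp
  | cons x l ih =>
      simp only [List.map_cons, List.count_cons, ih]
      by_cases hc : c' = c <;> by_cases hx : p = x <;>
        simp [hc, hx, Prod.ext_iff] <;> omega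

theorem getD_innerF (w : List Char) (d : PySem.Dict (Int × List Char) Int) (L : Int) (p : List Char) :
    (((PySem.List.pyRange 0 (w.length : Int) 1).foldl
        (fun d i => bumpP d ((w.length : Int), PySem.List.slice w none (some i))) d).getD (L, p) 0)
      = d.getD (L, p) 0
        + (if (w.length : Int) = L ∧ p <+: w ∧ p.length < w.length then 1 else 0) := by
  rw [PySem.List.pyRange_zero_natCast, List.foldl_map]
  have hsl : (fun (d : PySem.Dict (Int × List Char) Int) (k : Nat) =>
      bumpP d ((w.length : Int), PySem.List.slice w none (some (k : Int))))
      = fun d k => d.insert ((w.length : Int), w.take k)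
          (d.getD ((w.length : Int), w.take k) 0 + 1) := by
    funext d k
    rw [bumpP, PySem.List.slice_to_natCast]
  rw [hsl]
  rw [← List.foldl_map (f := fun k => (((w.length : Int)), w.take k))
        (g := fun (d : PySem.Dict (Int × List Char) Int) x => d.insert x (d.getD x 0 + 1))]
  rw [PySem.Dict.getD_foldl_insert_add_one]
  rw [show (fun k => (((w.length : Int)), w.take k))
        = (fun x => (((w.length : Int)), x)) ∘ (fun k => w.take k) from rfl,
      ← List.map_map]
  rw [count_pair_const, count_take_range w p w.length le_rfl]
  by_cases h1 : L = ((w.length : Int))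
  · rw [if_pos h1]
    by_cases h2 : p <+: w ∧ p.length < w.length
    · rw [if_pos h2, if_pos ⟨h1.symm, h2.1, h2.2⟩]
      norm_num
    · rw [if_neg h2, if_neg (by rintro ⟨-, hh1, hh2⟩; exact h2 ⟨hh1, hh2⟩)]
      norm_num
  · rw [if_neg h1, if_neg (by rintro ⟨hh, -⟩; exact h1 hh.symm)]
    norm_num

theorem addWord_fst (st : PySem.Dict Int Int × PySem.Dict (Int × List Char) Int × PySem.Dict (Int × List Char) Int)
    (w : List Char) : (addWord st w).1 = st.1.insert (w.length : Int) (st.1.getD (w.length : Int) 0 + 1) := rfl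

theorem addWord_snd (st : PySem.Dict Int Int × PySem.Dict (Int × List Char) Int × PySem.Dict (Int × List Char) Int)
    (w : List Char) :
    (addWord st w).2.1
      = (PySem.List.pyRange 0 (w.length : Int) 1).foldl
          (fun d i => bumpP d ((w.length : Int), PySem.List.slice w none (some i))) st.2.1 := by
  simp only [addWord]
  rw [PySem.List.foldl_prod_mk
      (f := fun d i => bumpP d ((w.length : Int), PySem.List.slice w none (some i)))
      (g := fun d i => bumpP d ((w.length : Int), PySem.List.slice w.reverse none (some i)))]

theorem addWord_thd (st : PySem.Dict Int Int × PySem.Dict (Int × List Char) Int × PySem.Dict (Int × List Char) Int)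
    (w : List Char) :
    (addWord st w).2.2
      = (PySem.List.pyRange 0 (w.length : Int) 1).foldl
          (fun d i => bumpP d ((w.length : Int), PySem.List.slice w.reverse none (some i))) st.2.2 := by
  simp only [addWord]
  rw [PySem.List.foldl_prod_mk
      (f := fun d i => bumpP d ((w.length : Int), PySem.List.slice w none (some i)))
      (g := fun d i => bumpP d ((w.length : Int), PySem.List.slice w.reverse none (some i)))]

theorem bstate_fst (words : List String)
    (st : PySem.Dict Int Int × PySem.Dict (Int × List Char) Int × PySem.Dict (Int × List Char) Int) (L : Int) :
    ((words.foldl (fun st w => addWord st w.toList) st).1).getD L 0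
      = st.1.getD L 0 + ((words.filter (fun w => decide ((w.toList.length : Int) = L))).length : Int) := by
  induction words generalizing st with
  | nil => simp
  | cons w words ih =>
      rw [List.foldl_cons, ih, addWord_fst, PySem.Dict.getD_insert, List.filter_cons]
      by_cases hk : ((w.toList.length : Int)) = L
      · rw [if_pos hk.symm, if_pos (decide_eq_true hk), List.length_cons, hk]
        push_cast
        ring
      · rw [if_neg (fun hh => hk hh.symm), decide_eq_false hk]
        simp

theorem bstate_snd (words : List String)
    (st : PySem.Dict Int Int × PySem.Dict (Int × List Char) Int × PySem.Dict (Int × List Char) Int)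
    (L : Int) (p : List Char) :
    ((words.foldl (fun st w => addWord st w.toList) st).2.1).getD (L, p) 0
      = st.2.1.getD (L, p) 0
        + ((words.filter (fun w => decide ((w.toList.length : Int) = L ∧ p <+: w.toList ∧ p.length < w.toList.length))).length : Int) := by
  induction words generalizing st with
  | nil => simp
  | cons w words ih =>
      rw [List.foldl_cons, ih, addWord_snd, getD_innerF, List.filter_cons]
      by_cases hw : ((w.toList.length : Int)) = L ∧ p <+: w.toList ∧ p.length < w.toList.length
      · rw [if_pos hw, if_pos (decide_eq_true hw), List.length_cons]
        push_cast
        ring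
      · rw [if_neg hw, decide_eq_false hw]
        simp

theorem bstate_thd (words : List String)
    (st : PySem.Dict Int Int × PySem.Dict (Int × List Char) Int × PySem.Dict (Int × List Char) Int)
    (L : Int) (p : List Char) :
    ((words.foldl (fun st w => addWord st w.toList) st).2.2).getD (L, p) 0
      = st.2.2.getD (L, p) 0
        + ((words.filter (fun w => decide ((w.toList.reverse.length : Int) = L ∧ p <+: w.toList.reverse ∧ p.length < w.toList.reverse.length))).length : Int) := by
  induction words generalizing st with
  | nil => simp
  | cons w words ih =>
      rw [List.foldl_cons, ih, addWord_thd]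
      rw [(by simp : ((w.toList.length : Int)) = ((w.toList.reverse.length : Int)))]
      rw [getD_innerF, List.filter_cons]
      by_cases hw : ((w.toList.reverse.length : Int)) = L ∧ p <+: w.toList.reverse ∧ p.length < w.toList.reverse.length
      · rw [if_pos hw, if_pos (decide_eq_true hw), List.length_cons]
        push_cast
        ring
      · rw [if_neg hw, decide_eq_false hw]
        simp

theorem takeWhile_length_lt (cs : List Char) (h : '?' ∈ cs) :
    (cs.takeWhile (fun c => c != '?')).length < cs.length := by
  have hpre := List.takeWhile_prefix (l := cs) (fun c => c != '?')
  rcases Nat.lt_or_ge (cs.takeWhile (fun c => c != '?')).length cs.length with hlt | hge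
  · exact hlt
  · exfalso
    have heq : cs.takeWhile (fun c => c != '?') = cs :=
      List.IsPrefix.eq_of_length_le hpre (by omega)
    have := (List.takeWhile_eq_self_iff).mp heq '?' h
    simp at this

theorem walk_ins_noq (cs : List Char) (h : '?' ∉ cs) (ws : List Char) (hp : ¬(cs <+: ws)) (t : PTrie) :
    walkAns (insWord t ws) cs = walkAns t cs := by
  induction cs generalizing ws t with
  | nil => rfl
  | cons c rest ih =>
      obtain ⟨ch, cnt⟩ := t
      have hc : c ≠ '?' := fun hh => h (hh ▸ List.mem_cons_self)
      have h' : '?' ∉ rest := fun hh => h (List.mem_cons_of_mem c hh)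
      cases ws with
      | nil => rfl
      | cons a ws' =>
          rw [insWord_cons, walk_ne _ _ _ _ hc, walk_ne _ _ _ _ hc]
          by_cases hac : a = c
          · subst hac
            have hp' : ¬(rest <+: ws') := fun hh => hp (List.cons_prefix_cons.mpr ⟨rfl, hh⟩)
            rw [clGet?_clSet_self]
            cases hg : clGet? ch a with
            | some t' => simp only [Option.getD_some]; exact ih h' ws' hp' t'
            | none =>
                simp only [Option.getD_none]
                rw [ih h' ws' hp' PTrie.empty, walk_empty]
          · rw [clGet?_clSet_of_ne ch a c _ (fun hh => hac hh.symm)]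

theorem walk_foldl_noq (f : String → List Char) (words : List String) (t : PTrie)
    (cs : List Char) (h : '?' ∉ cs) (hnt : ∀ w ∈ words, ¬(cs <+: f w)) :
    walkAns (words.foldl (fun t w => insWord t (f w)) t) cs = walkAns t cs := by
  induction words generalizing t with
  | nil => rfl
  | cons w words ih =>
      rw [List.foldl_cons,
        ih (insWord t (f w)) (fun w hw => hnt w (List.mem_cons_of_mem _ hw)),
        walk_ins_noq cs h (f w) (hnt w List.mem_cons_self) t]

theorem wcnt_eq_filter (words : List String) (f : String → List Char) (L : Nat) (p : List Char)
    (hp : p.length < L) :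
    wcnt (words.map f) L p
      = ((words.filter (fun w => decide (((f w).length : Int) = (L : Int) ∧ p <+: f w ∧ p.length < (f w).length))).length : Int) := by
  unfold wcnt
  rw [List.filter_map, List.length_map]
  congr 2
  apply List.filter_congr
  intro w _
  apply decide_eq_decide.mpr
  constructor
  · rintro ⟨h1, h2⟩
    exact ⟨by exact_mod_cast congrArg (Nat.cast : Nat → Int) h1, h2, by omega⟩
  · rintro ⟨h1, h2, -⟩
    exact ⟨by exact_mod_cast h1, h2⟩

theorem mem_of_head?_q (cs : List Char) (h : cs.head? = some '?') : '?' ∈ cs := by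
  cases cs with
  | nil => simp at h
  | cons a l => simp at h; simp [h]

-- ===== VERDICT (by name: the statement is the Claim_ definition above) =====
theorem solution_spec : Claim_equal_solution := by
  intro words queries _ hpre
  unfold Spec_solution
  simp only [solution, solution_alt]
  apply List.map_congr_left
  intro q hq
  obtain ⟨hne, hor⟩ := hpre q hq
  by_cases h1 : q.toList.head? = some '?' ∧ q.toList.getLast? = some '?'
  · rw [if_pos h1, if_pos h1]
    rw [root_foldl words PTrie.empty, bstate_fst words _ _]
    have base1 : rootCount PTrie.empty ((q.toList.length : Int)) = 0 := by
      simp [PTrie.empty, rootCount, PySem.Dict.getD_empty]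
    rw [base1, PySem.Dict.getD_empty]
    have hl : 0 < q.toList.length := List.length_pos_iff.mpr hne
    have hfc : ∀ w ∈ words,
        (decide ((w.toList.length : Int) = ((q.toList.length : Int)) ∧ w.toList ≠ []))
          = (decide ((w.toList.length : Int) = ((q.toList.length : Int)))) := by
      intro w _
      apply decide_eq_decide.mpr
      constructor
      · rintro ⟨hh, -⟩; exact hh
      · intro hh
        refine ⟨hh, fun hnil => ?_⟩
        rw [hnil] at hh
        have h0 : q.toList.length = 0 := by exact_mod_cast hh.symm
        omega
    rw [List.filter_congr hfc]
  · rw [if_neg h1, if_neg h1]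
    by_cases h2 : q.toList.getLast? = some '?'
    · have hh : ¬(q.toList.head? = some '?') := fun hh => h1 ⟨hh, h2⟩
      rw [if_pos h2, if_pos h2, if_neg hh]
      have hq' : '?' ∈ q.toList := List.mem_of_getLast? h2
      rw [walk_foldl (fun w => w.toList) words PTrie.empty q.toList hq', walk_empty]
      rw [bstate_snd, PySem.Dict.getD_empty]
      rw [wcnt_eq_filter words (fun w => w.toList) q.toList.length
            (q.toList.takeWhile (fun c => c != '?')) (takeWhile_length_lt q.toList hq')]
    · by_cases h3 : q.toList.head? = some '?'
      · rw [if_neg h2, if_neg h2, if_pos h3]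
        have hq' : '?' ∈ q.toList.reverse := by
          rw [List.mem_reverse]
          exact mem_of_head?_q q.toList h3
        rw [walk_foldl (fun w => w.toList.reverse) words PTrie.empty q.toList.reverse hq', walk_empty]
        rw [bstate_thd, PySem.Dict.getD_empty]
        rw [wcnt_eq_filter words (fun w => w.toList.reverse) q.toList.reverse.length
              (q.toList.reverse.takeWhile (fun c => c != '?')) (takeWhile_length_lt q.toList.reverse hq')]
        rw [List.length_reverse]
      · obtain ⟨hnoq, hnt⟩ : '?' ∉ q.toList ∧ ∀ w ∈ words, ¬(q.toList <+: w.toList.reverse) := by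
          rcases hor with h | h | h
          · exact absurd h h3
          · exact absurd h h2
          · exact h
        rw [if_neg h2, if_neg h2, if_neg h3]
        rw [walk_foldl_noq (fun w => w.toList.reverse) words PTrie.empty q.toList hnoq hnt,
          walk_empty]
        rw [bstate_thd, PySem.Dict.getD_empty]
        have htw : q.toList.reverse.takeWhile (fun c => c != '?') = q.toList.reverse := by
          apply List.takeWhile_eq_self_iff.mpr
          intro x hx
          simp only [bne_iff_ne, ne_eq]
          intro hxq
          exact hnoq (List.mem_reverse.mp (hxq ▸ hx))
        rw [htw]
        have hfe : (words.filter (fun w =>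
            decide ((w.toList.reverse.length : Int) = ((q.toList.length : Int)) ∧
              q.toList.reverse <+: w.toList.reverse ∧
              q.toList.reverse.length < w.toList.reverse.length))) = [] := by
          apply List.filter_eq_nil_iff.mpr
          intro w _
          simp only [decide_eq_true_eq]
          rintro ⟨hl, -, hlt⟩
          rw [List.length_reverse] at hl
          rw [List.length_reverse, List.length_reverse] at hlt
          omega
        rw [hfe]
        simp
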